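-- pv_equiv track=rewrite | github.com/KotisKotlyandii/lessons1 | ege22/173.py | f
-- ===== SOURCE A (Python) =====
-- def f(x):
--     a,b = 0,0
--     while x > 0:
--         a += 1
--         if x % 11 > b:
--             b = x % 11
--         x //= 11
--     return a,b
-- ===== SOURCE B (Python) =====
-- def f(x):
--     a = 0
--     while 11 ** a <= x:
--         a += 1
--     b = max((x // 11 ** i % 11 for i in range(a)), default=0)
--     return (a, b)
-- ===== Notes on version B (the rewrite author's own statement) =====
-- stated objective: alternative
-- what changed: A strips base-11 digits bottom-up by repeated division while tracking count and running max; B first finds the digit count as the least a with 11**a > x by growing powers (no division), then extracts each digit top-down by x // 11**i % 11 over range(a) and takes max with default 0.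
import Mathlib
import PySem

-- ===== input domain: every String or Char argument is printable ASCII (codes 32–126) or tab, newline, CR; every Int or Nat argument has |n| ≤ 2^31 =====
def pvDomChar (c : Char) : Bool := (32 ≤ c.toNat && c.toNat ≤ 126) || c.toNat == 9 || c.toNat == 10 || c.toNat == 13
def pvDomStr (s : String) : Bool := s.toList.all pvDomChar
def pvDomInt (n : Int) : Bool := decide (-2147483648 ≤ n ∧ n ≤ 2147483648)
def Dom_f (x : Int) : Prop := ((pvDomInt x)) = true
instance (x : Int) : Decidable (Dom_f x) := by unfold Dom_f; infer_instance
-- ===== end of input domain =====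

-- B finds the digit count as the least a with 11^a > x (growing powers, no division of x),
-- then extracts digits top-down by x // 11**i % 11 over range(a); A does one fused bottom-up division loop.


theorem pvFloordiv11_toNat_lt (x : Int) (hx : 0 < x) :
    (PySem.Int.floordiv x 11).toNat < x.toNat := by
  rw [PySem.Int.floordiv_eq_ediv_of_pos (by omega)]
  omega

theorem pvNat_lt_pow11 (a : Nat) : (a : Int) < (11 : Int) ^ a := by
  have h : a < 11 ^ a := Nat.lt_pow_self (by norm_num)
  exact_mod_cast h

-- ===== PORT A =====
def fGo (x a b : Int) : Int × Int :=
  if x > 0 then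
    fGo (PySem.Int.floordiv x 11) (a + 1)
      (if PySem.Int.mod x 11 > b then PySem.Int.mod x 11 else b)
  else (a, b)
termination_by x.toNat
decreasing_by exact pvFloordiv11_toNat_lt x (by omega)

def f (x : Int) : Int × Int := fGo x 0 0

-- ===== PORT B =====
-- 'while 11 ** a <= x: a += 1' — a starts at 0 and only increments, so it is kept as a Nat
def countGo (x : Int) (a : Nat) : Nat :=
  if (11 : Int) ^ a ≤ x then countGo x (a + 1) else a
termination_by x.toNat - a
decreasing_by
  have := pvNat_lt_pow11 a
  omega

-- i ranges over range(a), so i ≥ 0 and '11 ** i' is exactly '11 ^ i.toNat'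
def f_alt (x : Int) : Int × Int :=
  let a := countGo x 0
  let b := match PySem.List.max?
      ((PySem.List.pyRange 0 (a : Int) 1).map
        (fun i => PySem.Int.mod (PySem.Int.floordiv x ((11 : Int) ^ i.toNat)) 11))
      (fun y => y) with
    | some m => m
    | none => 0
  ((a : Int), b)

-- ===== PRECONDITION & SPEC =====
def Spec_f (x : Int) (out : Int × Int) : Prop := out = f_alt x
instance (x : Int) (out : Int × Int) : Decidable (Spec_f x out) := by unfold Spec_f; infer_instance

-- ===== CLAIM (what is proved, stated in full; the proofs are below) =====
def Claim_equal_f : Prop := ∀ (x : Int), Dom_f x → Spec_f x (f x)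

-- ===== LEMMAS AND PROOFS =====

-- the digit list A traverses, in cons shape
def digitsOf (x : Int) : List Int :=
  if x > 0 then PySem.Int.mod x 11 :: digitsOf (PySem.Int.floordiv x 11) else []
termination_by x.toNat
decreasing_by exact pvFloordiv11_toNat_lt x (by omega)

theorem digitsOf_nonneg (x : Int) : ∀ d ∈ digitsOf x, 0 ≤ d := by
  induction x using digitsOf.induct with
  | case1 x hx ih =>
      rw [digitsOf, if_pos hx]
      intro d hd
      rcases List.mem_cons.mp hd with h | h
      · subst h
        rw [PySem.Int.mod_eq_emod_of_pos (by omega)]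
        omega
      · exact ih d h
  | case2 x hx =>
      rw [digitsOf, if_neg hx]; intro d hd; cases hd

theorem fGo_eq (x a b : Int) :
    fGo x a b = (a + (digitsOf x).length, (digitsOf x).foldl max b) := by
  induction x, a, b using fGo.induct with
  | case1 x a b hx ih =>
      simp only [dite_eq_ite] at ih
      rw [fGo, if_pos hx, ih]
      conv_rhs => rw [digitsOf, if_pos hx]
      refine Prod.ext ?_ ?_
      · simp; omega
      · simp only [List.foldl_cons]
        congr 1
        rw [Int.max_def]
        split_ifs <;> omega
  | case2 x a b hx =>
      rw [fGo, if_neg hx, digitsOf, if_neg hx]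
      simp

-- 11 ^ a ≤ x → a < number of digits
theorem pow_le_lt_len (x : Int) : ∀ (a : Nat), (11 : Int) ^ a ≤ x → a < (digitsOf x).length := by
  induction x using digitsOf.induct with
  | case1 x hx ih =>
      intro a ha
      rw [digitsOf, if_pos hx]
      cases a with
      | zero => simp
      | succ a' =>
          have h : (11 : Int) ^ a' ≤ PySem.Int.floordiv x 11 := by
            rw [PySem.Int.floordiv_eq_ediv_of_pos (by omega)]
            rw [Int.le_ediv_iff_mul_le (by omega)]
            calc (11:Int) ^ a' * 11 = 11 ^ (a' + 1) := by ring
              _ ≤ x := ha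
          have := ih a' h
          simp only [List.length_cons]
          omega
  | case2 x hx =>
      intro a ha
      have : (0:Int) < 11 ^ a := pow_pos (by norm_num) a
      omega

-- a < number of digits → 11 ^ a ≤ x
theorem lt_len_pow_le (x : Int) : ∀ (a : Nat), a < (digitsOf x).length → (11 : Int) ^ a ≤ x := by
  induction x using digitsOf.induct with
  | case1 x hx ih =>
      intro a ha
      cases a with
      | zero => simpa using hx
      | succ a' =>
          rw [digitsOf, if_pos hx, List.length_cons] at ha
          have h := ih a' (by omega)
          rw [PySem.Int.floordiv_eq_ediv_of_pos (by omega),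
              Int.le_ediv_iff_mul_le (by omega)] at h
          calc (11:Int) ^ (a' + 1) = 11 ^ a' * 11 := by ring
            _ ≤ x := h
  | case2 x hx =>
      intro a ha
      rw [digitsOf, if_neg hx] at ha
      simp at ha

theorem countGo_eq (x : Int) : ∀ (a : Nat), a ≤ (digitsOf x).length → countGo x a = (digitsOf x).length := by
  intro a
  induction a using countGo.induct x with
  | case1 a h ih =>
      intro _
      have hlt := pow_le_lt_len x a h
      rw [countGo, if_pos h]
      exact ih (by omega)
  | case2 a h =>
      intro hle
      rw [countGo, if_neg h]
      by_contra hne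
      exact h (lt_len_pow_le x a (by omega))

-- the top-down digit formula hits A's digit list
theorem digit_formula (x : Int) : ∀ (i : Nat), i < (digitsOf x).length →
    PySem.Int.mod (PySem.Int.floordiv x ((11 : Int) ^ i)) 11 = (digitsOf x).getD i 0 := by
  induction x using digitsOf.induct with
  | case1 x hx ih =>
      intro i hi
      rw [digitsOf, if_pos hx]
      cases i with
      | zero =>
          simp only [pow_zero, List.getD_cons_zero]
          rw [PySem.Int.floordiv_eq_ediv_of_pos (by omega), Int.ediv_one]
      | succ i' =>
          rw [digitsOf, if_pos hx, List.length_cons] at hi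
          have key : PySem.Int.floordiv x ((11:Int) ^ (i' + 1))
              = PySem.Int.floordiv (PySem.Int.floordiv x 11) ((11:Int) ^ i') := by
            have hp : (0:Int) < 11 ^ i' := pow_pos (by norm_num) i'
            have h1 : PySem.Int.floordiv x 11 = x / 11 :=
              PySem.Int.floordiv_eq_ediv_of_pos (by omega)
            rw [h1, PySem.Int.floordiv_eq_ediv_of_pos hp,
                PySem.Int.floordiv_eq_ediv_of_pos (by positivity : (0:Int) < 11 ^ (i' + 1)),
                Int.ediv_ediv_of_nonneg (by omega : (0:Int) ≤ 11)]
            congr 1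
            ring
          rw [key, List.getD_cons_succ]
          exact ih i' (by omega)
  | case2 x hx =>
      intro i hi
      rw [digitsOf, if_neg hx] at hi
      simp at hi

theorem map_range_digits (x : Int) :
    (PySem.List.pyRange 0 ((digitsOf x).length : Int) 1).map
      (fun i => PySem.Int.mod (PySem.Int.floordiv x ((11 : Int) ^ i.toNat)) 11)
    = digitsOf x := by
  rw [PySem.List.pyRange_one]
  simp only [sub_zero, Int.toNat_natCast, List.map_map]
  apply List.ext_getElem
  · simp
  · intro i h1 h2
    simp only [List.getElem_map, List.getElem_range, Function.comp_apply]
    have hi : i < (digitsOf x).length := by simpa using h2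
    rw [show ((0:Int) + (i:Int)).toNat = i by omega]
    rw [digit_formula x i hi, List.getD_eq_getElem _ _ hi]

-- ===== VERDICT (by name: the statement is the Claim_ definition above) =====
theorem f_spec : Claim_equal_f := by
  intro x _
  show f x = f_alt x
  rw [f, fGo_eq, f_alt]
  simp only [countGo_eq x 0 (Nat.zero_le _), map_range_digits]
  rcases h : digitsOf x with _ | ⟨d, t⟩
  · simp [PySem.List.max?]
  · have hnn := digitsOf_nonneg x
    rw [h] at hnn
    have hd0 : (0:Int) ≤ d := hnn d (by simp)
    simp [PySem.List.max?_id_cons, max_eq_right hd0]
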